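-- pv_equiv track=rewrite | github.com/hypergraphman/PermAEGE23 | task19-21/49.py | f
-- ===== SOURCE A (Python) =====
-- win = 20
--
-- def f(a, b, c, m):
--     # if a + b > lose:
--     #     return c % 2 != m % 2
--     if a + b <= win:
--         return c % 2 == m % 2
--     if c == m:
--         return False
--     moves = [f(a - 1, b, c + 1, m),
--              f((a + 1) // 2, b, c + 1, m),
--              f(a, b - 1, c + 1, m),
--              f(a, (b + 1) // 2, c + 1, m)]
--
--     return any(moves) if (c + 1) % 2 == m % 2 else all(moves)
-- ===== SOURCE B (Python) =====
-- win = 20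
--
-- def f(a, b, c, m):
--     memo = {}
--
--     def go(a, b, c):
--         if a + b <= win:
--             return c % 2 == m % 2
--         if c == m:
--             return False
--         key = (a, b, c)
--         if key in memo:
--             return memo[key]
--         if (c + 1) % 2 == m % 2:
--             r = (go(a - 1, b, c + 1) or go((a + 1) // 2, b, c + 1)
--                  or go(a, b - 1, c + 1) or go(a, (b + 1) // 2, c + 1))
--         else:
--             r = (go(a - 1, b, c + 1) and go((a + 1) // 2, b, c + 1)
--                  and go(a, b - 1, c + 1) and go(a, (b + 1) // 2, c + 1))
--         memo[key] = r
--         return r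
--
--     return go(a, b, c)
-- ===== Notes on version B (the rewrite author's own statement) =====
-- stated objective: alternative
-- what changed: Replace A's plain 4-way recursion (which re-explores the same (a,b,c) state over and over) by top-down recursion with a memo dict on (a,b,c) and short-circuit or/and, so each state is evaluated at most once.
import Mathlib
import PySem

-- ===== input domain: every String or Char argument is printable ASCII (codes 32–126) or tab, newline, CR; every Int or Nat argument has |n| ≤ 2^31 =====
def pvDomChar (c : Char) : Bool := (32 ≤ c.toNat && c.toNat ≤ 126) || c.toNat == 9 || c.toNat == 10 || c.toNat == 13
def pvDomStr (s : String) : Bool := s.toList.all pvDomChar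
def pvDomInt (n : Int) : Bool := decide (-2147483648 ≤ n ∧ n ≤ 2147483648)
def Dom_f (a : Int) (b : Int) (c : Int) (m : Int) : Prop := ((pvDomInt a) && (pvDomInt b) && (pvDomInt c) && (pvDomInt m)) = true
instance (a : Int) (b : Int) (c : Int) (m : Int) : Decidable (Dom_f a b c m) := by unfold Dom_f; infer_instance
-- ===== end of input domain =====

-- B replaces A's plain 4-way recursion by memoized recursion on the state (a, b, c) with
-- short-circuit or/and, so each state is evaluated at most once (objective: alternative).
-- Both ports are fueled transliterations; the fuel only makes the recursion total in Lean
-- and is proved sufficient on Pre_f.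

-- ===== PORT A =====
-- fueled transliteration of A's recursion (fuel only makes it total; value on fuel 0 never reached under Pre_f)
def fA : Nat → Int → Int → Int → Int → Bool
  | 0, _, _, _, _ => false
  | n + 1, a, b, c, m =>
    if a + b ≤ 20 then PySem.Int.mod c 2 == PySem.Int.mod m 2
    else if c = m then false
    else
      let moves := [fA n (a - 1) b (c + 1) m,
                    fA n (PySem.Int.floordiv (a + 1) 2) b (c + 1) m,
                    fA n a (b - 1) (c + 1) m,
                    fA n a (PySem.Int.floordiv (b + 1) 2) (c + 1) m]
      if PySem.Int.mod (c + 1) 2 == PySem.Int.mod m 2 then moves.any id else moves.all id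

def f (a : Int) (b : Int) (c : Int) (m : Int) : Bool := fA ((m - c).toNat + 40) a b c m

-- ===== PORT B =====
-- transliteration of Source B: inner 'go' with a memo dict on (a, b, c) and short-circuit or/and
def goB (m : Int) : Nat → Int → Int → Int → PySem.Dict (Int × Int × Int) Bool →
    Bool × PySem.Dict (Int × Int × Int) Bool
  | 0, _, _, _, d => (false, d)
  | n + 1, a, b, c, d =>
    if a + b ≤ 20 then (PySem.Int.mod c 2 == PySem.Int.mod m 2, d)
    else if c = m then (false, d)
    else
      match d.get? (a, b, c) with
      | some v => (v, d)
      | none =>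
        if PySem.Int.mod (c + 1) 2 == PySem.Int.mod m 2 then
          -- r = go(a-1,b,c+1) or go((a+1)//2,b,c+1) or go(a,b-1,c+1) or go(a,(b+1)//2,c+1)
          let p1 := goB m n (a - 1) b (c + 1) d
          if p1.1 then (true, p1.2.insert (a, b, c) true) else
          let p2 := goB m n (PySem.Int.floordiv (a + 1) 2) b (c + 1) p1.2
          if p2.1 then (true, p2.2.insert (a, b, c) true) else
          let p3 := goB m n a (b - 1) (c + 1) p2.2
          if p3.1 then (true, p3.2.insert (a, b, c) true) else
          let p4 := goB m n a (PySem.Int.floordiv (b + 1) 2) (c + 1) p3.2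
          (p4.1, p4.2.insert (a, b, c) p4.1)
        else
          -- r = go(a-1,b,c+1) and go((a+1)//2,b,c+1) and go(a,b-1,c+1) and go(a,(b+1)//2,c+1)
          let p1 := goB m n (a - 1) b (c + 1) d
          if !p1.1 then (false, p1.2.insert (a, b, c) false) else
          let p2 := goB m n (PySem.Int.floordiv (a + 1) 2) b (c + 1) p1.2
          if !p2.1 then (false, p2.2.insert (a, b, c) false) else
          let p3 := goB m n a (b - 1) (c + 1) p2.2
          if !p3.1 then (false, p3.2.insert (a, b, c) false) else
          let p4 := goB m n a (PySem.Int.floordiv (b + 1) 2) (c + 1) p3.2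
          (p4.1, p4.2.insert (a, b, c) p4.1)

def f_alt (a : Int) (b : Int) (c : Int) (m : Int) : Bool :=
  (goB m ((m - c).toNat + 40) a b c PySem.Dict.empty).1

-- ===== PRECONDITION & SPEC =====
-- Pre_f excludes exactly the inputs on which A raises instead of returning: (i) with
-- a + b > 20, c > m and a ≥ 20 or b ≥ 20 the recursion contains a path that stalls on a
-- fixed point of halving while c grows past m forever, so A recurses without bound and dies
-- with RecursionError; (ii) A's recursion is one frame per unit of m - c, so once m - c
-- exceeds CPython's default 1000-frame recursion limit A raises RecursionError on its first
-- (leftmost) path; m - c ≤ 900 stays safely below that limit.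
def Pre_f (a : Int) (b : Int) (c : Int) (m : Int) : Prop :=
  a + b ≤ 20 ∨ c = m ∨ (a ≤ 19 ∧ b ≤ 19) ∨ (c < m ∧ m - c ≤ 900)
instance (a : Int) (b : Int) (c : Int) (m : Int) : Decidable (Pre_f a b c m) := by
  unfold Pre_f; infer_instance
def pvWitness_f : Int × Int × Int × Int := (19, 5, 0, 3)

def Spec_f (a : Int) (b : Int) (c : Int) (m : Int) (out : Bool) : Prop := out = f_alt a b c m
instance (a : Int) (b : Int) (c : Int) (m : Int) (out : Bool) : Decidable (Spec_f a b c m out) := by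
  unfold Spec_f; infer_instance

-- ===== CLAIM (what is proved, stated in full; the proofs are below) =====
def Claim_equal_f : Prop := ∀ (a : Int) (b : Int) (c : Int) (m : Int),
  Dom_f a b c m → Pre_f a b c m → Spec_f a b c m (f a b c m)

-- ===== LEMMAS AND PROOFS =====

-- recursion-depth bound used as the induction measure
def depthF (a : Int) (b : Int) (c : Int) (m : Int) : Nat :=
  if a + b ≤ 20 then 1 else if c = m then 1
  else if c < m then (m - c).toNat + 1 else (a + b - 19).toNat

-- reference value: A's port at exactly the measure's fuel
def Rf (a : Int) (b : Int) (c : Int) (m : Int) : Bool := fA (depthF a b c m) a b c m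

lemma depthF_pos (a b c m : Int) : 1 ≤ depthF a b c m := by
  unfold depthF; split_ifs <;> omega

lemma step_all (a b c m : Int) (h1 : ¬ a + b ≤ 20) (h2 : ¬ c = m) (hp : Pre_f a b c m) :
    (Pre_f (a - 1) b (c + 1) m ∧ depthF (a - 1) b (c + 1) m < depthF a b c m) ∧
    (Pre_f (PySem.Int.floordiv (a + 1) 2) b (c + 1) m ∧
      depthF (PySem.Int.floordiv (a + 1) 2) b (c + 1) m < depthF a b c m) ∧
    (Pre_f a (b - 1) (c + 1) m ∧ depthF a (b - 1) (c + 1) m < depthF a b c m) ∧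
    (Pre_f a (PySem.Int.floordiv (b + 1) 2) (c + 1) m ∧
      depthF a (PySem.Int.floordiv (b + 1) 2) (c + 1) m < depthF a b c m) := by
  rw [PySem.Int.floordiv_eq_ediv_of_pos (a := a + 1) (by norm_num : (0:Int) < 2),
      PySem.Int.floordiv_eq_ediv_of_pos (a := b + 1) (by norm_num : (0:Int) < 2)]
  unfold Pre_f at hp ⊢
  unfold depthF
  split_ifs <;> omega

lemma fA_fuel : ∀ k n₁ n₂ a b c m, Pre_f a b c m → depthF a b c m ≤ k →
    depthF a b c m ≤ n₁ → depthF a b c m ≤ n₂ → fA n₁ a b c m = fA n₂ a b c m := by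
  intro k
  induction k with
  | zero => intro n₁ n₂ a b c m _ hk _ _; have := depthF_pos a b c m; omega
  | succ k ih =>
    intro n₁ n₂ a b c m hp hk h1 h2
    have hd := depthF_pos a b c m
    obtain ⟨n₁', rfl⟩ : ∃ t, n₁ = t + 1 := ⟨n₁ - 1, by omega⟩
    obtain ⟨n₂', rfl⟩ : ∃ t, n₂ = t + 1 := ⟨n₂ - 1, by omega⟩
    show fA (n₁' + 1) a b c m = fA (n₂' + 1) a b c m
    simp only [fA]
    by_cases hb : a + b ≤ 20
    · simp [hb]
    · by_cases hc : c = m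
      · simp [hb, hc]
      · obtain ⟨⟨q1, d1⟩, ⟨q2, d2⟩, ⟨q3, d3⟩, ⟨q4, d4⟩⟩ := step_all a b c m hb hc hp
        rw [ih n₁' n₂' _ _ _ _ q1 (by omega) (by omega) (by omega),
            ih n₁' n₂' _ _ _ _ q2 (by omega) (by omega) (by omega),
            ih n₁' n₂' _ _ _ _ q3 (by omega) (by omega) (by omega),
            ih n₁' n₂' _ _ _ _ q4 (by omega) (by omega) (by omega)]

-- the memo invariant: every stored value is the reference value of its key
def InvM (m : Int) (d : PySem.Dict (Int × Int × Int) Bool) : Prop :=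
  ∀ a b c v, d.get? (a, b, c) = some v → v = Rf a b c m

lemma InvM_empty (m : Int) : InvM m PySem.Dict.empty := by
  intro a b c v h
  simp [PySem.Dict.get?, PySem.Dict.empty] at h

lemma InvM_insert (m : Int) (d : PySem.Dict (Int × Int × Int) Bool) (x y z : Int) (v : Bool)
    (hd : InvM m d) (hv : v = Rf x y z m) : InvM m (d.insert (x, y, z) v) := by
  intro a b c w h
  rw [PySem.Dict.get?_insert] at h
  by_cases he : ((a, b, c) : Int × Int × Int) = (x, y, z)
  · simp only [Prod.mk.injEq] at he
    obtain ⟨rfl, rfl, rfl⟩ := he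
    simp at h
    rw [← h, hv]
  · rw [if_neg he] at h
    exact hd a b c w h

lemma Rf_unfold (a b c m : Int) (h1 : ¬ a + b ≤ 20) (h2 : ¬ c = m) (hp : Pre_f a b c m) :
    Rf a b c m =
      (if PySem.Int.mod (c + 1) 2 == PySem.Int.mod m 2 then
        [Rf (a - 1) b (c + 1) m, Rf (PySem.Int.floordiv (a + 1) 2) b (c + 1) m,
         Rf a (b - 1) (c + 1) m, Rf a (PySem.Int.floordiv (b + 1) 2) (c + 1) m].any id
       else
        [Rf (a - 1) b (c + 1) m, Rf (PySem.Int.floordiv (a + 1) 2) b (c + 1) m,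
         Rf a (b - 1) (c + 1) m, Rf a (PySem.Int.floordiv (b + 1) 2) (c + 1) m].all id) := by
  obtain ⟨⟨q1, d1⟩, ⟨q2, d2⟩, ⟨q3, d3⟩, ⟨q4, d4⟩⟩ := step_all a b c m h1 h2 hp
  have hd := depthF_pos a b c m
  unfold Rf
  obtain ⟨D, hD⟩ : ∃ t, depthF a b c m = t + 1 := ⟨depthF a b c m - 1, by omega⟩
  rw [hD]
  simp only [fA, h1, h2, if_false]
  rw [fA_fuel D D (depthF (a-1) b (c+1) m) _ _ _ _ q1 (by omega) (by omega) (by omega),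
      fA_fuel D D (depthF (PySem.Int.floordiv (a+1) 2) b (c+1) m) _ _ _ _ q2 (by omega) (by omega) (by omega),
      fA_fuel D D (depthF a (b-1) (c+1) m) _ _ _ _ q3 (by omega) (by omega) (by omega),
      fA_fuel D D (depthF a (PySem.Int.floordiv (b+1) 2) (c+1) m) _ _ _ _ q4 (by omega) (by omega) (by omega)]

lemma goB_correct (m : Int) : ∀ k n a b c d, Pre_f a b c m → depthF a b c m ≤ k →
    depthF a b c m ≤ n → InvM m d →
    (goB m n a b c d).1 = Rf a b c m ∧ InvM m (goB m n a b c d).2 := by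
  intro k
  induction k with
  | zero => intro n a b c d _ hk _ _; have := depthF_pos a b c m; omega
  | succ k ih =>
    intro n a b c d hp hk hn hInv
    have hd := depthF_pos a b c m
    obtain ⟨n', rfl⟩ : ∃ t, n = t + 1 := ⟨n - 1, by omega⟩
    by_cases hb : a + b ≤ 20
    · have hdep : depthF a b c m = 1 := by unfold depthF; simp [hb]
      constructor
      · show (goB m (n' + 1) a b c d).1 = Rf a b c m
        unfold Rf; rw [hdep]
        simp [goB, fA, hb]
      · show InvM m (goB m (n' + 1) a b c d).2
        simp only [goB, if_pos hb]
        exact hInv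
    · by_cases hc : c = m
      · have hdep : depthF a b c m = 1 := by unfold depthF; simp [hb, hc]
        constructor
        · show (goB m (n' + 1) a b c d).1 = Rf a b c m
          unfold Rf; rw [hdep]
          simp [goB, fA, hb, hc]
        · show InvM m (goB m (n' + 1) a b c d).2
          simp only [goB, if_neg hb, if_pos hc]
          exact hInv
      · obtain ⟨⟨q1, d1⟩, ⟨q2, d2⟩, ⟨q3, d3⟩, ⟨q4, d4⟩⟩ := step_all a b c m hb hc hp
        have RU := Rf_unfold a b c m hb hc hp
        rcases hmem : d.get? (a, b, c) with _ | v
        · simp only [goB, if_neg hb, if_neg hc, hmem]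
          obtain ⟨h1v, h1i⟩ := ih n' (a - 1) b (c + 1) d q1 (by omega) (by omega) hInv
          by_cases hpar : (PySem.Int.mod (c + 1) 2 == PySem.Int.mod m 2) = true
          · rw [if_pos hpar] at RU
            rw [if_pos hpar]
            cases hr1 : Rf (a - 1) b (c + 1) m with
            | true =>
              simp only [h1v, hr1]
              rw [if_pos (by simp)]
              have hv : Rf a b c m = true := by rw [RU]; simp only [hr1, List.any_cons, List.any_nil, List.all_cons, List.all_nil, id_eq, Bool.false_or, Bool.true_or, Bool.or_false, Bool.or_true, Bool.and_true, Bool.true_and, Bool.false_and, Bool.and_false]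
              exact ⟨by rw [hv], InvM_insert m _ a b c true h1i hv.symm⟩
            | false =>
              rw [h1v, hr1, if_neg (by simp)]
              obtain ⟨h2v, h2i⟩ := ih n' (PySem.Int.floordiv (a + 1) 2) b (c + 1) _ q2
                (by omega) (by omega) h1i
              cases hr2 : Rf (PySem.Int.floordiv (a + 1) 2) b (c + 1) m with
              | true =>
                simp only [h2v, hr2]
                rw [if_pos (by simp)]
                have hv : Rf a b c m = true := by rw [RU]; simp only [hr1, hr2, List.any_cons, List.any_nil, List.all_cons, List.all_nil, id_eq, Bool.false_or, Bool.true_or, Bool.or_false, Bool.or_true, Bool.and_true, Bool.true_and, Bool.false_and, Bool.and_false]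
                exact ⟨by rw [hv], InvM_insert m _ a b c true h2i hv.symm⟩
              | false =>
                rw [h2v, hr2, if_neg (by simp)]
                obtain ⟨h3v, h3i⟩ := ih n' a (b - 1) (c + 1) _ q3 (by omega) (by omega) h2i
                cases hr3 : Rf a (b - 1) (c + 1) m with
                | true =>
                  simp only [h3v, hr3]
                  rw [if_pos (by simp)]
                  have hv : Rf a b c m = true := by rw [RU]; simp only [hr1, hr2, hr3, List.any_cons, List.any_nil, List.all_cons, List.all_nil, id_eq, Bool.false_or, Bool.true_or, Bool.or_false, Bool.or_true, Bool.and_true, Bool.true_and, Bool.false_and, Bool.and_false]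
                  exact ⟨by rw [hv], InvM_insert m _ a b c true h3i hv.symm⟩
                | false =>
                  rw [h3v, hr3, if_neg (by simp)]
                  obtain ⟨h4v, h4i⟩ := ih n' a (PySem.Int.floordiv (b + 1) 2) (c + 1) _ q4
                    (by omega) (by omega) h3i
                  have hv : Rf a b c m = Rf a (PySem.Int.floordiv (b + 1) 2) (c + 1) m := by
                    rw [RU]; simp only [hr1, hr2, hr3, List.any_cons, List.any_nil, List.all_cons, List.all_nil, id_eq, Bool.false_or, Bool.true_or, Bool.or_false, Bool.or_true, Bool.and_true, Bool.true_and, Bool.false_and, Bool.and_false]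
                  exact ⟨by rw [h4v, hv], InvM_insert m _ a b c _ h4i (h4v.trans hv.symm)⟩
          · rw [if_neg hpar] at RU
            rw [if_neg hpar]
            cases hr1 : Rf (a - 1) b (c + 1) m with
            | false =>
              simp only [h1v, hr1]
              rw [if_pos (by simp)]
              have hv : Rf a b c m = false := by rw [RU]; simp only [hr1, List.any_cons, List.any_nil, List.all_cons, List.all_nil, id_eq, Bool.false_or, Bool.true_or, Bool.or_false, Bool.or_true, Bool.and_true, Bool.true_and, Bool.false_and, Bool.and_false]
              exact ⟨by rw [hv], InvM_insert m _ a b c false h1i hv.symm⟩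
            | true =>
              rw [h1v, hr1, if_neg (by simp)]
              obtain ⟨h2v, h2i⟩ := ih n' (PySem.Int.floordiv (a + 1) 2) b (c + 1) _ q2
                (by omega) (by omega) h1i
              cases hr2 : Rf (PySem.Int.floordiv (a + 1) 2) b (c + 1) m with
              | false =>
                simp only [h2v, hr2]
                rw [if_pos (by simp)]
                have hv : Rf a b c m = false := by rw [RU]; simp only [hr1, hr2, List.any_cons, List.any_nil, List.all_cons, List.all_nil, id_eq, Bool.false_or, Bool.true_or, Bool.or_false, Bool.or_true, Bool.and_true, Bool.true_and, Bool.false_and, Bool.and_false]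
                exact ⟨by rw [hv], InvM_insert m _ a b c false h2i hv.symm⟩
              | true =>
                rw [h2v, hr2, if_neg (by simp)]
                obtain ⟨h3v, h3i⟩ := ih n' a (b - 1) (c + 1) _ q3 (by omega) (by omega) h2i
                cases hr3 : Rf a (b - 1) (c + 1) m with
                | false =>
                  simp only [h3v, hr3]
                  rw [if_pos (by simp)]
                  have hv : Rf a b c m = false := by rw [RU]; simp only [hr1, hr2, hr3, List.any_cons, List.any_nil, List.all_cons, List.all_nil, id_eq, Bool.false_or, Bool.true_or, Bool.or_false, Bool.or_true, Bool.and_true, Bool.true_and, Bool.false_and, Bool.and_false]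
                  exact ⟨by rw [hv], InvM_insert m _ a b c false h3i hv.symm⟩
                | true =>
                  rw [h3v, hr3, if_neg (by simp)]
                  obtain ⟨h4v, h4i⟩ := ih n' a (PySem.Int.floordiv (b + 1) 2) (c + 1) _ q4
                    (by omega) (by omega) h3i
                  have hv : Rf a b c m = Rf a (PySem.Int.floordiv (b + 1) 2) (c + 1) m := by
                    rw [RU]; simp only [hr1, hr2, hr3, List.any_cons, List.any_nil, List.all_cons, List.all_nil, id_eq, Bool.false_or, Bool.true_or, Bool.or_false, Bool.or_true, Bool.and_true, Bool.true_and, Bool.false_and, Bool.and_false]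
                  exact ⟨by rw [h4v, hv], InvM_insert m _ a b c _ h4i (h4v.trans hv.symm)⟩
        · simp only [goB, if_neg hb, if_neg hc, hmem]
          exact ⟨hInv a b c v hmem, hInv⟩

lemma depthF_le_fuel (a b c m : Int) (hp : Pre_f a b c m) :
    depthF a b c m ≤ (m - c).toNat + 40 := by
  unfold Pre_f at hp
  unfold depthF
  split_ifs <;> omega

-- ===== VERDICT (by name: the statement is the Claim_ definition above) =====
theorem f_spec : Claim_equal_f := by
  intro a b c m _ hp
  unfold Spec_f f f_alt
  have hle := depthF_le_fuel a b c m hp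
  have hA : fA ((m - c).toNat + 40) a b c m = Rf a b c m :=
    fA_fuel ((m - c).toNat + 40) ((m - c).toNat + 40) (depthF a b c m) a b c m hp hle hle
      (le_refl _)
  have hB := goB_correct m ((m - c).toNat + 40) ((m - c).toNat + 40) a b c PySem.Dict.empty hp
    hle hle (InvM_empty m)
  rw [hA, hB.1]
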